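-- pv_equiv track=rewrite | github.com/vanessadamario/understanding_reasoning | CLOSURE-master/vr/models/task_division.py | invert_task_div
-- ===== SOURCE A (Python) =====
-- def invert_task_div(dict_separated_tasks):
--     dct_program_token = {}
--     dct_program_idx = {}
--
--     for k_group, v_group in dict_separated_tasks.items():
--         for k_prog, v_prog in v_group.items():
--             dct_program_token[k_prog] = k_group
--             dct_program_idx[v_prog] = k_group
--
--     map_id_subtasks = [dct_program_idx[jj] if jj in dct_program_idx.keys() else -1
--                        for jj in range(44)]
--
--     return map_id_subtasks
-- ===== SOURCE B (Python) =====
-- def invert_task_div(dict_separated_tasks):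
--     map_id_subtasks = [-1] * 44
--     for k_group, v_group in dict_separated_tasks.items():
--         for v_prog in v_group.values():
--             if 0 <= v_prog < 44:
--                 map_id_subtasks[v_prog] = k_group
--     return map_id_subtasks
-- ===== Notes on version B (the rewrite author's own statement) =====
-- stated objective: simpler
-- what changed: B drops the unused token dict and the intermediate inverse dict entirely and fills the 44-slot result list directly in one pass with a 0<=v_prog<44 bounds guard, instead of building a dict and then scanning range(44).
import Mathlib
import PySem

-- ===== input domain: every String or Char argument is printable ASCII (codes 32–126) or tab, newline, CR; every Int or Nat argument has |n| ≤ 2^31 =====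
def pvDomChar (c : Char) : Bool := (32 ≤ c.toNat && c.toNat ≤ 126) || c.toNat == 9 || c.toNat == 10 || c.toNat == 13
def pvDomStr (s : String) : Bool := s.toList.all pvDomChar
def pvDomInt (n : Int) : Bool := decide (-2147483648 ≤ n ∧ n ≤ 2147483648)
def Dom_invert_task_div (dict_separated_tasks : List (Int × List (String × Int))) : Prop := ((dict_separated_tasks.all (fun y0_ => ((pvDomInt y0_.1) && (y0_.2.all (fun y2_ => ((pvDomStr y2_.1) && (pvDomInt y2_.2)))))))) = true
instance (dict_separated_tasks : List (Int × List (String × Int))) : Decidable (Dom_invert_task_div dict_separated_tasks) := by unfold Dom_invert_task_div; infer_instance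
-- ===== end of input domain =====

-- B drops the unused token dict and the intermediate inverse dict and fills the
-- 44-slot result list directly in one pass (objective: simpler).

-- ===== PORT A =====
-- A builds dct_program_token (unused) and dct_program_idx, then scans range(44).
def invert_task_div (dict_separated_tasks : List (Int × List (String × Int))) : List Int :=
  let dicts : PySem.Dict String Int × PySem.Dict Int Int :=
    dict_separated_tasks.foldl
      (fun ds kv =>
        kv.2.foldl (fun ds2 p => (ds2.1.insert p.1 kv.1, ds2.2.insert p.2 kv.1)) ds)
      (PySem.Dict.empty, PySem.Dict.empty)
  (PySem.List.pyRange 0 44 1).map (fun jj => dicts.2.getD jj (-1))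

-- ===== PORT B =====
def invert_task_div_alt (dict_separated_tasks : List (Int × List (String × Int))) : List Int :=
  dict_separated_tasks.foldl
    (fun m kv =>
      kv.2.foldl (fun m2 p =>
        if 0 ≤ p.2 ∧ p.2 < 44 then m2.set p.2.toNat kv.1 else m2) m)
    (List.replicate 44 (-1))

-- ===== PRECONDITION & SPEC =====
def Spec_invert_task_div (dict_separated_tasks : List (Int × List (String × Int))) (out : List Int) : Prop := out = invert_task_div_alt dict_separated_tasks
instance (dict_separated_tasks : List (Int × List (String × Int))) (out : List Int) : Decidable (Spec_invert_task_div dict_separated_tasks out) := by unfold Spec_invert_task_div; infer_instance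

-- ===== CLAIM (what is proved, stated in full; the proofs are below) =====
def Claim_equal_invert_task_div : Prop := ∀ (dict_separated_tasks : List (Int × List (String × Int))), Dom_invert_task_div dict_separated_tasks → Spec_invert_task_div dict_separated_tasks (invert_task_div dict_separated_tasks)

-- ===== LEMMAS AND PROOFS =====

-- invariant: m is the 44-slot memo of dc under default -1
def pvInv (dc : PySem.Dict Int Int) (m : List Int) : Prop :=
  m.length = 44 ∧ ∀ j : Nat, j < 44 → m[j]? = some (dc.getD (j : Int) (-1))

theorem pvInv_empty : pvInv PySem.Dict.empty (List.replicate 44 (-1)) := by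
  refine ⟨List.length_replicate, fun j hj => ?_⟩
  rw [List.getElem?_replicate]
  simp [hj, PySem.Dict.getD_empty]

theorem pvInv_step (dc : PySem.Dict Int Int) (m : List Int) (vp kg : Int)
    (h : pvInv dc m) :
    pvInv (dc.insert vp kg) (if 0 ≤ vp ∧ vp < 44 then m.set vp.toNat kg else m) := by
  obtain ⟨hlen, hget⟩ := h
  by_cases hb : 0 ≤ vp ∧ vp < 44
  · simp only [if_pos hb]
    refine ⟨by simp [hlen], fun j hj => ?_⟩
    rw [List.getElem?_set]
    rw [PySem.Dict.getD_insert]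
    by_cases hj' : (j : Int) = vp
    · have : vp.toNat = j := by omega
      simp [this, hlen, hj, hj']
    · have : vp.toNat ≠ j := by omega
      simp only [this, if_false, if_neg hj']
      exact hget j hj
  · simp only [if_neg hb]
    refine ⟨hlen, fun j hj => ?_⟩
    rw [PySem.Dict.getD_insert]
    have : (j : Int) ≠ vp := by omega
    simp only [if_neg this]
    exact hget j hj

theorem pvInv_inner (v : List (String × Int)) (kg : Int)
    (t : PySem.Dict String Int) (dc : PySem.Dict Int Int) (m : List Int)
    (h : pvInv dc m) :
    pvInv (v.foldl (fun ds2 p => (ds2.1.insert p.1 kg, ds2.2.insert p.2 kg)) (t, dc)).2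
      (v.foldl (fun m2 p => if 0 ≤ p.2 ∧ p.2 < 44 then m2.set p.2.toNat kg else m2) m) := by
  induction v generalizing t dc m with
  | nil => exact h
  | cons p rest ih =>
    simp only [List.foldl_cons]
    exact ih _ _ _ (pvInv_step dc m p.2 kg h)

theorem pvInv_outer (l : List (Int × List (String × Int)))
    (t : PySem.Dict String Int) (dc : PySem.Dict Int Int) (m : List Int)
    (h : pvInv dc m) :
    pvInv (l.foldl (fun ds kv =>
        kv.2.foldl (fun ds2 p => (ds2.1.insert p.1 kv.1, ds2.2.insert p.2 kv.1)) ds) (t, dc)).2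
      (l.foldl (fun m' kv =>
        kv.2.foldl (fun m2 p => if 0 ≤ p.2 ∧ p.2 < 44 then m2.set p.2.toNat kv.1 else m2) m') m) := by
  induction l generalizing t dc m with
  | nil => exact h
  | cons kv rest ih =>
    simp only [List.foldl_cons]
    have h2 := pvInv_inner kv.2 kv.1 t dc m h
    obtain ⟨t', dc'⟩ := kv.2.foldl (fun ds2 p => (ds2.1.insert p.1 kv.1, ds2.2.insert p.2 kv.1)) (t, dc)
    exact ih _ _ _ h2

theorem pvInv_final (dc : PySem.Dict Int Int) (m : List Int) (h : pvInv dc m) :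
    (PySem.List.pyRange 0 44 1).map (fun jj => dc.getD jj (-1)) = m := by
  obtain ⟨hlen, hget⟩ := h
  apply List.ext_getElem
  · simp [PySem.List.length_pyRange_one, hlen]
  · intro i h1 h2
    have hi : i < 44 := by simpa [PySem.List.length_pyRange_one] using h1
    have := hget i hi
    rw [List.getElem?_eq_getElem h2] at this
    simp only [List.getElem_map, PySem.List.getElem_pyRange_one]
    simp only [Option.some.injEq] at this
    simp only [zero_add]
    exact this.symm

-- ===== VERDICT (by name: the statement is the Claim_ definition above) =====
theorem invert_task_div_spec : Claim_equal_invert_task_div := by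
  intro d _
  unfold Spec_invert_task_div invert_task_div invert_task_div_alt
  exact pvInv_final _ _ (pvInv_outer d PySem.Dict.empty PySem.Dict.empty _ pvInv_empty)
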